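-- pv_equiv track=rewrite | github.com/SebastianCB-dev/python-universidad-andes | Modulo3/Matrices/ejercicio2.py | hacer_la_vaca
-- ===== SOURCE A (Python) =====
-- def hacer_la_vaca(salon: list, vaca: str) -> list:
--     result = []
--     mayor_i = 0
--     mayor_j = 0
--     tot = 0
--     for i in range(0, len(salon)):
--         for j in range(0, len(salon[i])):
--             if salon[i][j] > salon[mayor_i][mayor_j]:
--                 mayor_i = i
--                 mayor_j = j
--             tot += salon[i][j]
--
--     if (vaca == 'botella' and tot >= 120000) or (vaca == 'pastel' and tot >= 35000):
--         result.append("Hay Vaca")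
--     else:
--         result.append("No Alcanza")
--     result.append([mayor_i, mayor_j])
--
--     return result
-- ===== SOURCE B (Python) =====
-- def hacer_la_vaca(salon: list, vaca: str) -> list:
--     # Sort-based: flatten to (value, i, j) cells; a STABLE sort by -value puts the
--     # first (row-major) maximum at the front; the total is the sum of the cell values;
--     # thresholds come from a lookup table.
--     cells = [(x, i, j) for i, row in enumerate(salon) for j, x in enumerate(row)]
--     ordered = sorted(cells, key=lambda c: -c[0])
--     pos = [ordered[0][1], ordered[0][2]] if ordered else [0, 0]
--     tot = sum(c[0] for c in cells)
--     limites = {'botella': 120000, 'pastel': 35000}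
--     msg = "Hay Vaca" if vaca in limites and tot >= limites[vaca] else "No Alcanza"
--     return [msg, pos]
-- ===== Notes on version B (the rewrite author's own statement) =====
-- stated objective: alternative
-- what changed: Replaces A's fused index-tracking loop by a sort-based algorithm: flatten the matrix to (value,i,j) cells, take the head of a stable sort by -value as the first row-major maximum, sum the cell values for the total, and read the thresholds from a lookup table.
import Mathlib
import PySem

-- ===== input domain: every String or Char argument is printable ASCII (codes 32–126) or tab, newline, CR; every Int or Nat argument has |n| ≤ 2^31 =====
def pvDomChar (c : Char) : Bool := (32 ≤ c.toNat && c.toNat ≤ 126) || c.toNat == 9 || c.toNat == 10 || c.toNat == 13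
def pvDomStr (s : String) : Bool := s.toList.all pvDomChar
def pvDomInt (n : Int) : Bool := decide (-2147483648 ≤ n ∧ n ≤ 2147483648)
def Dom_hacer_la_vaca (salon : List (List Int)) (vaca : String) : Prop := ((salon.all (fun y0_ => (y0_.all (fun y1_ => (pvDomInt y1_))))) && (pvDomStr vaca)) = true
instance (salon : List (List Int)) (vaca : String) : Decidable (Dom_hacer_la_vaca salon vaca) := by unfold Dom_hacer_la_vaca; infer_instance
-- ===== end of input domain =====

-- B replaces A's fused index-tracking loop by a sort-based algorithm (flatten to cells, stable sort by -value, head = first maximum; total = sum of cells; thresholds via a lookup table); objective: alternative.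

-- ===== PORT A =====
-- Exception state: the Option wrapper is `none` exactly where Python raises IndexError (salon[0][0] with an empty first row).
def hacer_la_vaca (salon : List (List Int)) (vaca : String) : String × List Int :=
  let st := (PySem.List.pyRange 0 (salon.length : Int) 1).foldl
    (fun st i =>
      (PySem.List.pyRange 0 (((PySem.List.pyGet? salon i).getD []).length : Int) 1).foldl
        (fun st j =>
          match st with
          | none => none
          | some (mi, mj, tot) =>
            match (PySem.List.pyGet? salon i).bind (fun r => PySem.List.pyGet? r j),
                  (PySem.List.pyGet? salon mi).bind (fun r => PySem.List.pyGet? r mj) with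
            | some x, some m => if m < x then some (i, j, tot + x) else some (mi, mj, tot + x)
            | _, _ => none)
        st)
    (some ((0 : Int), (0 : Int), (0 : Int)))
  match st with
  | some (mi, mj, tot) =>
      ((if (vaca = "botella" ∧ tot ≥ 120000) ∨ (vaca = "pastel" ∧ tot ≥ 35000) then "Hay Vaca" else "No Alcanza"),
       [mi, mj])
  | none => ("", [])   -- unreachable under Pre_

-- ===== PORT B =====
def hacer_la_vaca_alt (salon : List (List Int)) (vaca : String) : String × List Int :=
  let cells := (PySem.List.enumerate salon).flatMap
    (fun p => (PySem.List.enumerate p.2).map (fun q => (q.2, p.1, q.1)))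
  let ordered := PySem.List.sorted cells (fun c => -c.1) false
  let pos := match ordered.head? with
    | some c => [c.2.1, c.2.2]
    | none => [(0 : Int), 0]
  let tot := (cells.map (fun c => c.1)).sum
  let limites : PySem.Dict String Int := PySem.Dict.ofList [("botella", 120000), ("pastel", 35000)]
  let msg := match PySem.Dict.get? limites vaca with
    | some l => if tot ≥ l then "Hay Vaca" else "No Alcanza"
    | none => "No Alcanza"
  (msg, pos)

-- ===== PRECONDITION & SPEC =====
-- Pre_ excludes exactly the inputs where A raises IndexError: a non-empty matrix whose first row is
-- empty while some later row is not (A indexes salon[0][0]).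
def Pre_hacer_la_vaca (salon : List (List Int)) (vaca : String) : Prop :=
  (∀ r ∈ salon, r = []) ∨ (salon.head?.getD []) ≠ []
instance (salon : List (List Int)) (vaca : String) : Decidable (Pre_hacer_la_vaca salon vaca) := by
  unfold Pre_hacer_la_vaca; infer_instance
def pvWitness_hacer_la_vaca : List (List Int) × String := ([[1, 2], [3]], "botella")

def Spec_hacer_la_vaca (salon : List (List Int)) (vaca : String) (out : String × List Int) : Prop :=
  out = hacer_la_vaca_alt salon vaca
instance (salon : List (List Int)) (vaca : String) (out : String × List Int) : Decidable (Spec_hacer_la_vaca salon vaca out) := by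
  unfold Spec_hacer_la_vaca; infer_instance

-- ===== CLAIM (what is proved, stated in full; the proofs are below) =====
def Claim_equal_hacer_la_vaca : Prop := ∀ (salon : List (List Int)) (vaca : String), Dom_hacer_la_vaca salon vaca → Pre_hacer_la_vaca salon vaca → Spec_hacer_la_vaca salon vaca (hacer_la_vaca salon vaca)

-- ===== LEMMAS AND PROOFS =====

def pvCellVal (salon : List (List Int)) (i j : Int) : Option Int :=
  (PySem.List.pyGet? salon i).bind (fun r => PySem.List.pyGet? r j)
def pvGood (salon : List (List Int)) (c : Int × Int × Int) : Prop :=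
  pvCellVal salon c.2.1 c.2.2 = some c.1
def pvMstep (b : Option (Int × Int × Int)) (c : Int × Int × Int) : Option (Int × Int × Int) :=
  match b with
  | none => some c
  | some m => if m.1 < c.1 then some c else some m
def pvStOf (cs : List (Int × Int × Int)) (tot : Int) : Option (Int × Int × Int) :=
  match cs.foldl pvMstep none with
  | some c => some (c.2.1, c.2.2, tot)
  | none => some (0, 0, tot)
def pvRowCells (i : Int) (row : List Int) (s : Int) : List (Int × Int × Int) :=
  (PySem.List.enumerate row s).map (fun q => (q.2, i, q.1))
def pvCellsFrom (salon : List (List Int)) (k : Nat) : List (Int × Int × Int) :=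
  (PySem.List.enumerate (salon.drop k) k).flatMap (fun p => pvRowCells p.1 p.2 0)

-- head of the stable insertion sort by -value IS A's running first-max loop
lemma pv_head_insertBy (x : Int × Int × Int) (ys : List (Int × Int × Int)) :
    (PySem.List.insertBy (fun a b => decide (-a.1 < -b.1)) x ys).head? = pvMstep ys.head? x := by
  cases ys with
  | nil => rfl
  | cons y t =>
    simp only [PySem.List.insertBy, pvMstep, List.head?_cons]
    by_cases h : y.1 < x.1
    · rw [if_pos (by simp; omega), if_pos h]; rfl
    · rw [if_neg (by simp; omega), if_neg h]; rfl

lemma pv_head_foldl_insertBy (xs : List (Int × Int × Int)) :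
    ∀ (acc : List (Int × Int × Int)),
    (xs.foldl (fun acc x => PySem.List.insertBy (fun a b => decide (-a.1 < -b.1)) x acc) acc).head?
      = xs.foldl pvMstep acc.head? := by
  induction xs with
  | nil => intro acc; rfl
  | cons x t ih =>
    intro acc
    simp only [List.foldl_cons]
    rw [ih, pv_head_insertBy]

lemma pv_head_sorted (cs : List (Int × Int × Int)) :
    (PySem.List.sorted cs (fun c => -c.1) false).head? = cs.foldl pvMstep none := by
  rw [PySem.List.sorted_eq_foldl_insertBy, pv_head_foldl_insertBy]
  rfl

-- the sum of the cell values is the sum of the row sums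
lemma pv_cells_sum (salon : List (List Int)) : ∀ (s : Int),
    (((PySem.List.enumerate salon s).flatMap
        (fun p => (PySem.List.enumerate p.2).map (fun q => (q.2, p.1, q.1)))).map
      (fun c => c.1)).sum = (salon.map List.sum).sum := by
  induction salon with
  | nil => intro s; rfl
  | cons row rest ih =>
    intro s
    simp only [PySem.List.enumerate_cons, List.flatMap_cons, List.map_append, List.sum_append,
      List.map_cons, List.sum_cons, ih]
    congr 1
    rw [List.map_map]
    have : ((fun c : Int × Int × Int => c.1) ∘ fun q : Int × Int => (q.2, s, q.1))
        = fun q : Int × Int => q.2 := rfl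
    rw [this, PySem.List.map_snd_enumerate]

lemma pv_limites_eq : PySem.Dict.ofList ([("botella", 120000), ("pastel", 35000)] : List (String × Int))
    = PySem.Dict.mk [("botella", 120000), ("pastel", 35000)] := by decide

-- A's threshold test equals B's table lookup
lemma pv_msg (vaca : String) (tot : Int) :
    (if (vaca = "botella" ∧ tot ≥ 120000) ∨ (vaca = "pastel" ∧ tot ≥ 35000) then ("Hay Vaca" : String) else "No Alcanza")
    = (match PySem.Dict.get? (PySem.Dict.ofList [("botella", 120000), ("pastel", 35000)]) vaca with
        | some l => if tot ≥ l then "Hay Vaca" else "No Alcanza"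
        | none => "No Alcanza") := by
  by_cases hb : vaca = "botella"
  · subst hb; simp [pv_limites_eq, PySem.Dict.get?_mk_cons]
  · by_cases hp : vaca = "pastel"
    · subst hp; simp [pv_limites_eq, PySem.Dict.get?_mk_cons]
    · have h1 : ("botella" == vaca) = false := by
        simp only [beq_eq_false_iff_ne, ne_eq]; exact fun h => hb h.symm
      have h2 : ("pastel" == vaca) = false := by
        simp only [beq_eq_false_iff_ne, ne_eq]; exact fun h => hp h.symm
      simp [pv_limites_eq, PySem.Dict.get?_mk_cons, h1, h2, hb, hp, PySem.Dict.get?]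

lemma pv_max?_eq_foldl (cs : List (Int × Int × Int)) :
    PySem.List.max? cs (fun c => c.1) = cs.foldl pvMstep none := by
  unfold PySem.List.max?
  congr 1
  funext b c
  cases b <;> rfl
lemma pv_foldl_mstep_isSome (cs : List (Int × Int × Int)) (b : Option (Int × Int × Int))
    (h : b.isSome) : (cs.foldl pvMstep b).isSome := by
  induction cs generalizing b with
  | nil => exact h
  | cons c t ih =>
    simp only [List.foldl_cons]
    apply ih
    match b, h with
    | some m, _ => simp only [pvMstep]; split <;> simp
lemma pv_foldl_mstep_none (cs : List (Int × Int × Int))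
    (h : cs.foldl pvMstep none = none) : cs = [] := by
  cases cs with
  | nil => rfl
  | cons c t =>
    exfalso
    have hs : (List.foldl pvMstep (some c) t).isSome := pv_foldl_mstep_isSome t (some c) rfl
    simp only [List.foldl_cons] at h
    rw [show pvMstep none c = some c from rfl] at h
    rw [h] at hs; simp at hs
lemma pv_foldl_mstep_mem (cs : List (Int × Int × Int)) (m : Int × Int × Int)
    (h : cs.foldl pvMstep none = some m) : m ∈ cs :=
  PySem.List.max?_mem (by rw [pv_max?_eq_foldl]; exact h)
lemma pv_step (salon : List (List Int)) (z : Int) (h0 : pvCellVal salon 0 0 = some z)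
    (i : Int) (row : List Int) (hi : PySem.List.pyGet? salon i = some row)
    (j0 : Nat) (hj0 : j0 < row.length)
    (cs : List (Int × Int × Int)) (tot : Int)
    (hmem : ∀ c ∈ cs, pvGood salon c)
    (hnil : cs = [] → i = 0 ∧ j0 = 0) :
    (match pvStOf cs tot with
      | none => none
      | some (mi, mj, tot) =>
        match (PySem.List.pyGet? salon i).bind (fun r => PySem.List.pyGet? r (j0 : Int)),
              (PySem.List.pyGet? salon mi).bind (fun r => PySem.List.pyGet? r mj) with
        | some x, some m => if m < x then some (i, (j0 : Int), tot + x) else some (mi, mj, tot + x)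
        | _, _ => none)
    = pvStOf (cs ++ [(row[j0], i, (j0 : Int))]) (tot + row[j0]) := by
  have hxacc : (PySem.List.pyGet? salon i).bind (fun r => PySem.List.pyGet? r (j0 : Int)) = some row[j0] := by
    rw [hi]
    simp [PySem.List.pyGet?_natCast, List.getElem?_eq_getElem hj0]
  cases hfold : cs.foldl pvMstep none with
  | none =>
    have hcs : cs = [] := pv_foldl_mstep_none cs hfold
    obtain ⟨hi0, hj00⟩ := hnil hcs
    subst hcs hi0 hj00
    have hz : PySem.List.pyGet? row 0 = some z := by
      simp only [pvCellVal, hi, Option.bind_some] at h0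
      exact h0
    have hx : row[0] = z := by
      have := hxacc
      rw [hi] at this
      simp only [Option.bind_some, Nat.cast_zero] at this
      rw [hz] at this
      exact (Option.some_injective _ this.symm)
    simp only [pvStOf, hfold, List.nil_append, List.foldl_cons, List.foldl_nil]
    rw [show pvMstep none (row[0], (0:Int), ((0:Nat):Int)) = some (row[0], (0:Int), ((0:Nat):Int)) from rfl]
    rw [hi]
    simp only [Option.bind_some, Nat.cast_zero, hz]
    simp [hx]
  | some m =>
    have hgood : pvCellVal salon m.2.1 m.2.2 = some m.1 := hmem m (pv_foldl_mstep_mem cs m hfold)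
    simp only [pvCellVal] at hgood
    simp only [pvStOf, hfold]
    rw [hxacc, hgood]
    simp only [List.foldl_append, List.foldl_cons, List.foldl_nil, hfold]
    by_cases hlt : m.1 < row[j0]
    · simp [pvMstep, hlt]
    · simp [pvMstep, hlt]
lemma pv_inner (salon : List (List Int)) (z : Int) (h0 : pvCellVal salon 0 0 = some z)
    (i : Int) (row : List Int) (hi : PySem.List.pyGet? salon i = some row) :
    ∀ (d : Nat) (j0 : Nat), j0 + d = row.length →
    ∀ (cs : List (Int × Int × Int)) (tot : Int),
      (∀ c ∈ cs, pvGood salon c) →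
      (cs = [] → i = 0 ∧ j0 = 0) →
      (PySem.List.pyRange (j0 : Int) ((j0 + d : Nat) : Int) 1).foldl
        (fun st j =>
          match st with
          | none => none
          | some (mi, mj, tot) =>
            match (PySem.List.pyGet? salon i).bind (fun r => PySem.List.pyGet? r j),
                  (PySem.List.pyGet? salon mi).bind (fun r => PySem.List.pyGet? r mj) with
            | some x, some m => if m < x then some (i, j, tot + x) else some (mi, mj, tot + x)
            | _, _ => none)
        (pvStOf cs tot)
      = pvStOf (cs ++ pvRowCells i (row.drop j0) (j0 : Int)) (tot + (row.drop j0).sum) := by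
  intro d
  induction d with
  | zero =>
    intro j0 hlen cs tot hmem hnil
    have hdrop : row.drop j0 = [] := by
      apply List.drop_eq_nil_of_le; omega
    have hrange : PySem.List.pyRange (j0 : Int) ((j0 + 0 : Nat) : Int) 1 = [] := by
      simp [PySem.List.pyRange]
    rw [hrange, hdrop]
    simp [pvRowCells, PySem.List.enumerate]
  | succ d ih =>
    intro j0 hlen cs tot hmem hnil
    have hj0 : j0 < row.length := by omega
    have hlt : (j0 : Int) < ((j0 + (d+1) : Nat) : Int) := by push_cast; omega
    rw [PySem.List.pyRange_one_cons hlt]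
    simp only [List.foldl_cons]
    rw [pv_step salon z h0 i row hi j0 hj0 cs tot hmem hnil]
    have hcast : ((j0 : Int) + 1) = (((j0 + 1 : Nat)) : Int) := by push_cast; ring
    have hcast2 : ((j0 + (d+1) : Nat) : Int) = (((j0 + 1) + d : Nat) : Int) := by push_cast; ring
    rw [hcast, hcast2]
    rw [ih (j0 + 1) (by omega) (cs ++ [(row[j0], i, (j0 : Int))]) (tot + row[j0])
      (by
        intro c hc
        rcases List.mem_append.1 hc with h | h
        · exact hmem c h
        · simp at h
          subst h
          simp only [pvGood, pvCellVal, hi, Option.bind_some]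
          simp [PySem.List.pyGet?_natCast, List.getElem?_eq_getElem hj0])
      (by simp)]
    have hdropc : row.drop j0 = row[j0] :: row.drop (j0 + 1) := List.drop_eq_getElem_cons hj0
    rw [hdropc]
    simp only [pvRowCells, PySem.List.enumerate_cons, List.map_cons, List.sum_cons]
    rw [hcast, List.append_assoc, List.singleton_append, add_assoc]
lemma pv_outer (salon : List (List Int)) (z : Int) (h0 : pvCellVal salon 0 0 = some z) :
    ∀ (d : Nat) (k : Nat), k + d = salon.length →
    ∀ (cs : List (Int × Int × Int)) (tot : Int),
      (∀ c ∈ cs, pvGood salon c) →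
      (cs = [] → k = 0) →
      (PySem.List.pyRange (k : Int) ((k + d : Nat) : Int) 1).foldl
        (fun st i =>
          (PySem.List.pyRange 0 (((PySem.List.pyGet? salon i).getD []).length : Int) 1).foldl
            (fun st j =>
              match st with
              | none => none
              | some (mi, mj, tot) =>
                match (PySem.List.pyGet? salon i).bind (fun r => PySem.List.pyGet? r j),
                      (PySem.List.pyGet? salon mi).bind (fun r => PySem.List.pyGet? r mj) with
                | some x, some m => if m < x then some (i, j, tot + x) else some (mi, mj, tot + x)
                | _, _ => none)
            st)
        (pvStOf cs tot)
      = pvStOf (cs ++ pvCellsFrom salon k) (tot + ((salon.drop k).map List.sum).sum) := by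
  intro d
  induction d with
  | zero =>
    intro k hlen cs tot hmem hnil
    have hdrop : salon.drop k = [] := by apply List.drop_eq_nil_of_le; omega
    have hrange : PySem.List.pyRange (k : Int) ((k + 0 : Nat) : Int) 1 = [] := by
      simp [PySem.List.pyRange]
    rw [hrange, hdrop]
    simp [pvCellsFrom, hdrop]
  | succ d ih =>
    intro k hlen cs tot hmem hnil
    have hk : k < salon.length := by omega
    have hrow : PySem.List.pyGet? salon (k : Int) = some salon[k] := by
      simp [PySem.List.pyGet?_natCast, List.getElem?_eq_getElem hk]
    have hlt : (k : Int) < ((k + (d+1) : Nat) : Int) := by push_cast; omega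
    rw [PySem.List.pyRange_one_cons hlt]
    simp only [List.foldl_cons]
    rw [show ((PySem.List.pyGet? salon (k : Int)).getD []) = salon[k] from by rw [hrow]; rfl]
    have hinner := pv_inner salon z h0 (k : Int) salon[k] hrow salon[k].length 0 (by omega)
      cs tot hmem (by intro hcs; exact ⟨by rw [hnil hcs]; norm_num, rfl⟩)
    simp only [Nat.cast_zero, zero_add, List.drop_zero] at hinner
    rw [hinner]
    have hcast : ((k : Int) + 1) = (((k + 1 : Nat)) : Int) := by push_cast; ring
    have hcast2 : ((k + (d+1) : Nat) : Int) = (((k + 1) + d : Nat) : Int) := by push_cast; ring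
    rw [hcast, hcast2]
    rw [ih (k + 1) (by omega) (cs ++ pvRowCells (k : Int) salon[k] 0) (tot + salon[k].sum)
      (by
        intro c hc
        rcases List.mem_append.1 hc with h | h
        · exact hmem c h
        · simp only [pvRowCells, List.mem_map] at h
          obtain ⟨q, hq, hqc⟩ := h
          rw [PySem.List.mem_enumerate_iff] at hq
          obtain ⟨t, ht, hqe⟩ := hq
          subst hqe
          subst hqc
          simp only [pvGood, pvCellVal, hrow, Option.bind_some]
          simp [PySem.List.pyGet?_natCast, List.getElem?_eq_getElem ht])
      (by
        intro hcs'
        exfalso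
        rcases List.append_eq_nil_iff.1 hcs' with ⟨hcs, hrc⟩
        have hk0 : k = 0 := hnil hcs
        subst hk0
        have hz0 : PySem.List.pyGet? salon[0] 0 = some z := by
          simp only [pvCellVal] at h0
          rw [show ((0:Nat):Int) = (0:Int) from by norm_num] at hrow
          rw [hrow, Option.bind_some] at h0
          exact h0
        cases hrow0 : salon[0] with
        | nil => rw [hrow0] at hz0; simp [PySem.List.pyGet?] at hz0
        | cons a t =>
          rw [hrow0] at hrc
          simp [pvRowCells, PySem.List.enumerate_cons] at hrc)]
    have hdropc : salon.drop k = salon[k] :: salon.drop (k + 1) := List.drop_eq_getElem_cons hk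
    rw [hdropc]
    simp only [List.map_cons, List.sum_cons]
    rw [show pvCellsFrom salon k = pvRowCells (k : Int) salon[k] 0 ++ pvCellsFrom salon (k + 1) from by
      simp only [pvCellsFrom, hdropc, PySem.List.enumerate_cons, List.flatMap_cons, hcast]]
    rw [List.append_assoc, add_assoc]

lemma pv_allempty (salon : List (List Int)) (h : ∀ r ∈ salon, r = []) (l : List Int) :
    l.foldl
      (fun st i =>
        (PySem.List.pyRange 0 (((PySem.List.pyGet? salon i).getD []).length : Int) 1).foldl
          (fun st j =>
            match st with
            | none => none
            | some (mi, mj, tot) =>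
              match (PySem.List.pyGet? salon i).bind (fun r => PySem.List.pyGet? r j),
                    (PySem.List.pyGet? salon mi).bind (fun r => PySem.List.pyGet? r mj) with
              | some x, some m => if m < x then some (i, j, tot + x) else some (mi, mj, tot + x)
              | _, _ => none)
          st)
      (some ((0 : Int), (0 : Int), (0 : Int)))
    = some ((0 : Int), (0 : Int), (0 : Int)) := by
  induction l with
  | nil => rfl
  | cons x l ih =>
    simp only [List.foldl_cons]
    have hlen : ((PySem.List.pyGet? salon x).getD []).length = 0 := by
      cases hg : PySem.List.pyGet? salon x with
      | none => rfl
      | some r =>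
        have hr : r ∈ salon := PySem.List.mem_of_pyGet?_eq_some salon hg
        simp [h r hr]
    rw [hlen]
    rw [show PySem.List.pyRange 0 (((0 : Nat)) : Int) 1 = [] from by simp [PySem.List.pyRange]]
    exact ih

-- ===== VERDICT (by name: the statements are the Claim_ definitions above) =====
theorem hacer_la_vaca_spec : Claim_equal_hacer_la_vaca := by
  intro salon vaca _ hpre
  unfold Spec_hacer_la_vaca
  by_cases hall : ∀ r ∈ salon, r = []
  · -- every row empty: the loops never touch the matrix
    simp only [hacer_la_vaca, hacer_la_vaca_alt]
    rw [pv_allempty salon hall]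
    have hcells : (PySem.List.enumerate salon).flatMap
        (fun p => (PySem.List.enumerate p.2).map (fun q => (q.2, p.1, q.1))) = [] := by
      rw [List.flatMap_eq_nil_iff]
      intro p hp
      have hmem : p.2 ∈ salon := by
        rw [← PySem.List.map_snd_enumerate salon 0]
        exact List.mem_map_of_mem hp
      rw [hall p.2 hmem]
      rfl
    rw [hcells]
    simp only [List.map_nil, List.sum_nil]
    exact congrArg₂ Prod.mk (pv_msg vaca 0) rfl
  · -- first row non-empty
    have hh : (salon.head?.getD []) ≠ [] := hpre.resolve_left hall
    cases salon with
    | nil => simp at hh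
    | cons r0 rest =>
      cases r0 with
      | nil => simp at hh
      | cons a t =>
        have h0 : pvCellVal ((a :: t) :: rest) 0 0 = some a := by
          simp only [pvCellVal]
          rw [show (0:Int) = ((0:Nat):Int) from by norm_num, PySem.List.pyGet?_natCast]
          simp
        have houter := pv_outer ((a :: t) :: rest) a h0 ((a :: t) :: rest).length 0 (by omega)
          [] 0 (by simp) (fun _ => rfl)
        simp only [Nat.cast_zero, zero_add, List.drop_zero, List.nil_append] at houter
        simp only [hacer_la_vaca, hacer_la_vaca_alt]
        rw [show (some ((0:Int), (0:Int), (0:Int))) = pvStOf [] 0 from rfl, houter]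
        rw [pv_head_sorted, pv_cells_sum ((a :: t) :: rest) 0]
        rw [show pvCellsFrom ((a :: t) :: rest) 0
            = (PySem.List.enumerate ((a :: t) :: rest)).flatMap
              (fun p => (PySem.List.enumerate p.2).map (fun q => (q.2, p.1, q.1))) from rfl]
        simp only [pvStOf]
        cases hfold : (PySem.List.enumerate ((a :: t) :: rest)).flatMap
            (fun p => (PySem.List.enumerate p.2).map (fun q => (q.2, p.1, q.1))) |>.foldl pvMstep none with
        | none => exact congrArg₂ Prod.mk (pv_msg vaca _) rfl
        | some c => exact congrArg₂ Prod.mk (pv_msg vaca _) rfl
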